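-- pv_equiv track=rewrite | github.com/balram-rajak/DSA-Algorithms | src/Discrete_Mathematics_for_Computer_Science/Mathematical thinking for computer science/Coins_3_5.py | change_Iterative
-- ===== SOURCE A (Python) =====
-- def change_Iterative(n):
--     assert n>=8
--     coins=[];
--     while(n % 5 !=0):
--
--         coins.append(3)
--         n -=3;
--
--     while(n!=0):
--         coins.append(5)
--         n -= 5;
--
--     return coins
-- ===== SOURCE B (Python) =====
-- def change_Iterative(n):
--     assert n >= 8
--     k = (2 * n) % 5
--     m = (n - 3 * k) // 5
--     return [3] * k + [5] * m
-- ===== Notes on version B (the rewrite author's own statement) =====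
-- stated objective: faster
-- what changed: Replaces the two decrement loops with a closed form: the number of 3s is k=(2*n)%5 (2 is the inverse of 3 mod 5) and the number of 5s is (n-3*k)//5, the list is built directly by replication.
import Mathlib
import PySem

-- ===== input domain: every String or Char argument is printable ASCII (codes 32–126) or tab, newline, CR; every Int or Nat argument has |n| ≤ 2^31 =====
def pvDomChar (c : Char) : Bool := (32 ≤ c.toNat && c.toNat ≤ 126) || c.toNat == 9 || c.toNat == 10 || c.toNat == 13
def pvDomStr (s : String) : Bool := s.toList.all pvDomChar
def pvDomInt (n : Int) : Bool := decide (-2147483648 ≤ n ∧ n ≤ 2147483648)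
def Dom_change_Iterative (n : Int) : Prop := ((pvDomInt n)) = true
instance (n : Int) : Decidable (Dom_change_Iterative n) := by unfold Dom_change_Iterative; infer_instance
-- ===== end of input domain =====

-- B replaces A's two decrement loops by a closed-form count of each coin ([3]*((2n)%5) ++ [5]*rest);
-- equivalence is proved for all n ≥ 8 (A's assert).

-- ===== PORT A =====
-- first while loop: append 3 and decrement by 3 while n % 5 != 0
-- (fuel makes it total; the loop body runs at most 4 times on ANY Int, so fuel 5 is always enough)
def loopA1 : Nat → Int → List Int → Int × List Int
  | 0, n, coins => (n, coins)
  | fuel + 1, n, coins =>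
    if PySem.Int.mod n 5 ≠ 0 then loopA1 fuel (n - 3) (coins ++ [3]) else (n, coins)

-- second while loop: append 5 and decrement by 5 while n != 0 (fuel makes it total;
-- fuel n.toNat suffices on every input the first loop can reach under the assert)
def loopA2 : Nat → Int → List Int → List Int
  | 0, _, coins => coins
  | fuel + 1, n, coins => if n ≠ 0 then loopA2 fuel (n - 5) (coins ++ [5]) else coins

def change_Iterative (n : Int) : List Int :=
  let p := loopA1 5 n []
  loopA2 p.1.toNat p.1 p.2

-- ===== PORT B =====
def change_Iterative_alt (n : Int) : List Int :=
  let k := PySem.Int.mod (2 * n) 5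
  let m := PySem.Int.floordiv (n - 3 * k) 5
  List.replicate k.toNat 3 ++ List.replicate m.toNat 5

-- ===== PRECONDITION & SPEC =====
-- Pre_: A's 'assert n >= 8' raises AssertionError below 8
def Pre_change_Iterative (n : Int) : Prop := 8 ≤ n
instance (n : Int) : Decidable (Pre_change_Iterative n) := by unfold Pre_change_Iterative; infer_instance
def pvWitness_change_Iterative : Int := 13

def Spec_change_Iterative (n : Int) (out : List Int) : Prop := out = change_Iterative_alt n
instance (n : Int) (out : List Int) : Decidable (Spec_change_Iterative n out) := by unfold Spec_change_Iterative; infer_instance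

-- ===== CLAIM (what is proved, stated in full; the proofs are below) =====
def Claim_equal_change_Iterative : Prop := ∀ (n : Int), Dom_change_Iterative n → Pre_change_Iterative n → Spec_change_Iterative n (change_Iterative n)

-- ===== LEMMAS AND PROOFS =====
theorem loopA1_spec (k : Nat) : ∀ (fuel : Nat) (n : Int) (coins : List Int),
    ((2 * n) % 5).toNat = k → k < fuel →
    loopA1 fuel n coins = (n - 3 * k, coins ++ List.replicate k 3) := by
  induction k with
  | zero =>
    intro fuel n coins hk hf
    obtain ⟨t, ht⟩ : ∃ t, t = 2 * n := ⟨_, rfl⟩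
    rw [← ht] at hk
    obtain ⟨f, rfl⟩ : ∃ f, fuel = f + 1 := ⟨fuel - 1, by omega⟩
    unfold loopA1
    simp only [PySem.Int.mod_eq_emod_of_pos (show (0:Int) < 5 by norm_num)]
    have h0 : n % 5 = 0 := by omega
    simp [h0]
  | succ k ih =>
    intro fuel n coins hk hf
    obtain ⟨t, ht⟩ : ∃ t, t = 2 * n := ⟨_, rfl⟩
    rw [← ht] at hk
    obtain ⟨f, rfl⟩ : ∃ f, fuel = f + 1 := ⟨fuel - 1, by omega⟩
    unfold loopA1
    simp only [PySem.Int.mod_eq_emod_of_pos (show (0:Int) < 5 by norm_num)]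
    have hne : n % 5 ≠ 0 := by omega
    have hrec : ((2 * (n - 3)) % 5).toNat = k := by
      have e : 2 * (n - 3) = t - 6 := by omega
      rw [e]; omega
    simp only [ne_eq, hne, not_false_eq_true, if_true, ih f _ _ hrec (by omega), Prod.mk.injEq]
    constructor
    · omega
    · simp [List.replicate_succ, List.append_assoc]

theorem loopA2_spec (m : Nat) : ∀ (fuel : Nat) (coins : List Int),
    m ≤ fuel → loopA2 fuel (5 * (m : Int)) coins = coins ++ List.replicate m 5 := by
  induction m with
  | zero =>
    intro fuel coins _
    cases fuel <;> simp [loopA2]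
  | succ m ih =>
    intro fuel coins hf
    obtain ⟨f, rfl⟩ : ∃ f, fuel = f + 1 := ⟨fuel - 1, by omega⟩
    have hne : (5 * ((m : Int) + 1)) ≠ 0 := by omega
    have harg : (5 : Int) * (↑m + 1) - 5 = 5 * (m : Int) := by ring
    simp only [loopA2, Nat.cast_succ, hne, ne_eq, not_false_eq_true, if_pos, harg,
      ih f (coins ++ [5]) (by omega)]
    simp [List.replicate_succ, List.append_assoc]

-- ===== VERDICT (by name: the statement is the Claim_ definition above) =====
theorem change_Iterative_spec : Claim_equal_change_Iterative := by
  intro n _ hn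
  have hn8 : (8 : Int) ≤ n := hn
  obtain ⟨t, ht⟩ : ∃ t, t = 2 * n := ⟨_, rfl⟩
  obtain ⟨k, hkt⟩ : ∃ k : Nat, (t % 5).toNat = k := ⟨_, rfl⟩
  have hk : ((2 * n) % 5).toNat = k := by rw [← ht]; exact hkt
  have hk4 : k < 5 := by omega
  have h1 := loopA1_spec k 5 n [] hk hk4
  obtain ⟨m, hm⟩ : ∃ m : Nat, n - 3 * (k : Int) = 5 * (m : Int) :=
    ⟨((n - 3 * (k : Int)) / 5).toNat, by omega⟩
  unfold Spec_change_Iterative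
  simp only [change_Iterative, change_Iterative_alt, h1, List.nil_append]
  rw [PySem.Int.mod_eq_emod_of_pos (show (0:Int) < 5 by norm_num),
      PySem.Int.floordiv_eq_ediv_of_pos (show (0:Int) < 5 by norm_num)]
  have hketa : (2 * n) % 5 = (k : Int) := by omega
  rw [hketa, hm, loopA2_spec m _ _ (by omega)]
  simp
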